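-- pv_equiv track=rewrite | github.com/yeomjw0907/onecation_sales_factory | web_dashboard.py | summarize_delivery_archive
-- ===== SOURCE A (Python) =====
-- from typing import Any
--
-- def summarize_delivery_archive(rows: list[dict[str, Any]]) -> dict[str, int]:
--     return {
--         "total": len(rows),
--         "sent": sum(1 for row in rows if row.get("status") == "sent"),
--         "blocked": sum(1 for row in rows if row.get("status") == "blocked"),
--         "failed": sum(1 for row in rows if row.get("status") == "failed"),
--         "tests": sum(1 for row in rows if row.get("kind") == "test_outbound_email"),
--     }
-- ===== SOURCE B (Python) =====
-- def summarize_delivery_archive(rows):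
--     total = sent = blocked = failed = tests = 0
--     for row in rows:
--         total += 1
--         status = row.get("status")
--         if status == "sent":
--             sent += 1
--         elif status == "blocked":
--             blocked += 1
--         elif status == "failed":
--             failed += 1
--         if row.get("kind") == "test_outbound_email":
--             tests += 1
--     return {"total": total, "sent": sent, "blocked": blocked,
--             "failed": failed, "tests": tests}
-- ===== Notes on version B (the rewrite author's own statement) =====
-- stated objective: alternative
-- what changed: Four independent comprehension passes over rows (plus len) are replaced by one loop maintaining five counters, with an if/elif chain on the status.
import Mathlib
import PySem

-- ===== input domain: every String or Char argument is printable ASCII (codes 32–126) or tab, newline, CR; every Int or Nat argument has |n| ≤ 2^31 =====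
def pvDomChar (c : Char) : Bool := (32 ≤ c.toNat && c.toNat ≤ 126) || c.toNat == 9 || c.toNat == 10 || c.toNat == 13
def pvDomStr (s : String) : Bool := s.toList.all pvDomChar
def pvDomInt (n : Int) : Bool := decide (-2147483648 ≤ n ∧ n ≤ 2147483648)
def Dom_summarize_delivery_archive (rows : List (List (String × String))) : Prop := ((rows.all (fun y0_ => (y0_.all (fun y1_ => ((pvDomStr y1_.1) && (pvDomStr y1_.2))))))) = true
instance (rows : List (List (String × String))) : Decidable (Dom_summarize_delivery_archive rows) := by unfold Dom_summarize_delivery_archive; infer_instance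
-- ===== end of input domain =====

-- B replaces A's four independent counting passes over rows by a single loop maintaining five counters (alternative decomposition, same cost class).


-- ===== PORT A =====
-- sum(1 for row in rows if cond) is a 0/1-sum, i.e. a countP (cf. PySem.List.sum_map_ite_one_zero)
def summarize_delivery_archive (rows : List (List (String × String))) : List (String × Int) :=
  [("total", (rows.length : Int)),
   ("sent", (rows.countP (fun row => PySem.Dict.get? (PySem.Dict.mk row) "status" == some "sent") : Int)),
   ("blocked", (rows.countP (fun row => PySem.Dict.get? (PySem.Dict.mk row) "status" == some "blocked") : Int)),
   ("failed", (rows.countP (fun row => PySem.Dict.get? (PySem.Dict.mk row) "status" == some "failed") : Int)),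
   ("tests", (rows.countP (fun row => PySem.Dict.get? (PySem.Dict.mk row) "kind" == some "test_outbound_email") : Int))]

-- ===== PORT B =====
-- one row-step of B's loop: bump total, an if/elif chain on status, an independent if on kind
def sdaStep (acc : Int × Int × Int × Int × Int) (row : List (String × String)) :
    Int × Int × Int × Int × Int :=
  let (t, s, b, f, te) := acc
  let status := PySem.Dict.get? (PySem.Dict.mk row) "status"
  let (s, b, f) :=
    if status == some "sent" then (s + 1, b, f)
    else if status == some "blocked" then (s, b + 1, f)
    else if status == some "failed" then (s, b, f + 1)
    else (s, b, f)
  let te := if PySem.Dict.get? (PySem.Dict.mk row) "kind" == some "test_outbound_email" then te + 1 else te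
  (t + 1, s, b, f, te)

def summarize_delivery_archive_alt (rows : List (List (String × String))) : List (String × Int) :=
  let (t, s, b, f, te) := rows.foldl sdaStep (0, 0, 0, 0, 0)
  [("total", t), ("sent", s), ("blocked", b), ("failed", f), ("tests", te)]

-- ===== PRECONDITION & SPEC =====
def Spec_summarize_delivery_archive (rows : List (List (String × String))) (out : List (String × Int)) : Prop := out = summarize_delivery_archive_alt rows
instance (rows : List (List (String × String))) (out : List (String × Int)) : Decidable (Spec_summarize_delivery_archive rows out) := by unfold Spec_summarize_delivery_archive; infer_instance

-- ===== CLAIM (what is proved, stated in full; the proofs are below) =====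
def Claim_equal_summarize_delivery_archive : Prop := ∀ (rows : List (List (String × String))), Dom_summarize_delivery_archive rows → Spec_summarize_delivery_archive rows (summarize_delivery_archive rows)

-- ===== LEMMAS AND PROOFS =====

-- loop invariant for B's single pass: each counter is its start value plus the corresponding count
theorem sda_foldl_inv (rows : List (List (String × String))) :
    ∀ (t s b f te : Int),
    rows.foldl sdaStep (t, s, b, f, te) =
      (t + rows.length,
       s + rows.countP (fun row => PySem.Dict.get? (PySem.Dict.mk row) "status" == some "sent"),
       b + rows.countP (fun row => PySem.Dict.get? (PySem.Dict.mk row) "status" == some "blocked"),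
       f + rows.countP (fun row => PySem.Dict.get? (PySem.Dict.mk row) "status" == some "failed"),
       te + rows.countP (fun row => PySem.Dict.get? (PySem.Dict.mk row) "kind" == some "test_outbound_email")) := by
  induction rows with
  | nil => intro t s b f te; simp
  | cons row rest ih =>
    intro t s b f te
    simp only [List.foldl_cons, List.countP_cons, List.length_cons, sdaStep]
    rw [ih]
    split_ifs with h1 h2 h3 <;>
      simp_all <;> ring_nf <;> simp_all

-- ===== VERDICT (by name: the statement is the Claim_ definition above) =====
theorem summarize_delivery_archive_spec : Claim_equal_summarize_delivery_archive := by
  intro rows _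
  unfold Spec_summarize_delivery_archive summarize_delivery_archive summarize_delivery_archive_alt
  rw [sda_foldl_inv]
  simp
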